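-- pv_equiv track=rewrite | github.com/jins408/Algorithm | programmers/Level1/덧칠하기.py | solution
-- ===== SOURCE A (Python) =====
-- def solution(n, m, section):
--     answer = 0
--
--     # 페인트칠한 마지막 위치
--     max = 0
--     for i in section:
--         # i가 max보다 크면 section에 칠해야하는 곳에 도착한것
--         if i > max:
--             # i가 페인트칠한 시작위치
--             # answer +1 해줌
--             answer +=1
--             # 페인트칠한 마지막위치를 알아야 하기 때문에 max값에 칠한시작위치(i)+롤러의길이(m)까지 더해주고 시작점이 포함되기 때문에 -1
--             max = i+m-1
--
--
--     return answer
-- ===== SOURCE B (Python) =====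
-- def solution(n, m, section):
--     # Divide and conquer: split the list in halves, solve each half threading the
--     # "last painted position" state through, and add the roll counts.
--     def go(xs, t):
--         if not xs:
--             return (0, t)
--         if len(xs) == 1:
--             x = xs[0]
--             return (1, x + m - 1) if x > t else (0, t)
--         mid = len(xs) // 2
--         c1, t1 = go(xs[:mid], t)
--         c2, t2 = go(xs[mid:], t1)
--         return (c1 + c2, t2)
--     return go(section, 0)[0]
-- ===== Notes on version B (the rewrite author's own statement) =====
-- stated objective: alternative
-- what changed: Replaces A's linear for-loop with mutable answer/max variables by a divide-and-conquer recursion that splits the list in halves, threads the painted-threshold state through the halves, and sums the two roll counts.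
import Mathlib
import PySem

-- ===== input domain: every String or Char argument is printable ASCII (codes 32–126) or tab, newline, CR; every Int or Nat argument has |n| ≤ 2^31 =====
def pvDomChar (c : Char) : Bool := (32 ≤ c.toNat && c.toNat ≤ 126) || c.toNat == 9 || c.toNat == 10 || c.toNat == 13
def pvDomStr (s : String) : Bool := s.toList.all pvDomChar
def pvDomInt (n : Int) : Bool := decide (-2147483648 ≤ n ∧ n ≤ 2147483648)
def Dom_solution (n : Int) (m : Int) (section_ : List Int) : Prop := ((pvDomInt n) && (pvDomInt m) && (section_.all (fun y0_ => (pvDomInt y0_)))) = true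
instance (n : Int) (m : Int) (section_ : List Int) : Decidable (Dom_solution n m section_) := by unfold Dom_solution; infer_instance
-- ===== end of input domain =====

-- B replaces A's linear scan with mutable answer/max variables by a divide-and-conquer
-- recursion on halves threading the threshold state (alternative decomposition, same result).

-- ===== PORT A =====
-- for i in section: if i > max: answer += 1; max = i + m - 1
def solution (n : Int) (m : Int) (section_ : List Int) : Int :=
  (section_.foldl (fun (st : Int × Int) i =>
      if i > st.2 then (st.1 + 1, i + m - 1) else st) (0, 0)).1

-- ===== PORT B =====
-- def go(xs, t): split at mid, recurse on both halves threading t, add counts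
def dcGo (m : Int) : List Int → Int → Int × Int
  | [], t => (0, t)
  | [x], t => if x > t then (1, x + m - 1) else (0, t)
  | x :: y :: rest, t =>
    let xs := x :: y :: rest
    let mid := xs.length / 2
    let p1 := dcGo m (xs.take mid) t
    let p2 := dcGo m (xs.drop mid) p1.2
    (p1.1 + p2.1, p2.2)
termination_by xs _ => xs.length
decreasing_by
  · simp only [List.length_take, List.length_cons]; omega
  · simp only [List.length_drop, List.length_cons]; omega

def solution_alt (n : Int) (m : Int) (section_ : List Int) : Int :=
  (dcGo m section_ 0).1

-- ===== PRECONDITION & SPEC =====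
def Spec_solution (n : Int) (m : Int) (section_ : List Int) (out : Int) : Prop := out = solution_alt n m section_
instance (n : Int) (m : Int) (section_ : List Int) (out : Int) : Decidable (Spec_solution n m section_ out) := by unfold Spec_solution; infer_instance

-- ===== CLAIM (what is proved, stated in full; the proofs are below) =====
def Claim_equal_solution : Prop := ∀ (n : Int) (m : Int) (section_ : List Int), Dom_solution n m section_ → Spec_solution n m section_ (solution n m section_)

-- ===== LEMMAS AND PROOFS =====

-- the count component of A's fold is additive in its initial value
theorem foldl_count_add (m : Int) (l : List Int) (c t : Int) :
    l.foldl (fun (st : Int × Int) i =>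
      if i > st.2 then (st.1 + 1, i + m - 1) else st) (c, t)
    = (c + (l.foldl (fun (st : Int × Int) i =>
        if i > st.2 then (st.1 + 1, i + m - 1) else st) (0, t)).1,
       (l.foldl (fun (st : Int × Int) i =>
        if i > st.2 then (st.1 + 1, i + m - 1) else st) (0, t)).2) := by
  induction l generalizing c t with
  | nil => simp
  | cons x xs ih =>
    by_cases h : x > t
    · simp only [List.foldl_cons, if_pos h, zero_add]
      rw [ih (c + 1) (x + m - 1), ih 1 (x + m - 1)]
      simp [add_assoc]
    · simp only [List.foldl_cons, if_neg h]
      exact ih c t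

-- B's divide-and-conquer equals A's left fold
theorem dcGo_eq_foldl (m : Int) (xs : List Int) (t : Int) :
    dcGo m xs t = xs.foldl (fun (st : Int × Int) i =>
      if i > st.2 then (st.1 + 1, i + m - 1) else st) (0, t) := by
  induction xs, t using dcGo.induct m with
  | case1 t => simp [dcGo]
  | case2 x t h => simp [dcGo, h]
  | case3 x t h => simp [dcGo, h]
  | case4 x y rest t xs mid p1 _ ih1 ih2 =>
    rw [show xs = x :: y :: rest from rfl, show mid = (x :: y :: rest).length / 2 from rfl,
        show p1 = dcGo m (List.take ((x :: y :: rest).length / 2) (x :: y :: rest)) t from rfl]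
      at ih2
    rw [dcGo]
    conv_rhs => rw [← List.take_append_drop ((x :: y :: rest).length / 2) (x :: y :: rest),
      List.foldl_append]
    rw [← ih1]
    rw [show (dcGo m (List.take ((x :: y :: rest).length / 2) (x :: y :: rest)) t)
        = ((dcGo m (List.take ((x :: y :: rest).length / 2) (x :: y :: rest)) t).1,
           (dcGo m (List.take ((x :: y :: rest).length / 2) (x :: y :: rest)) t).2) from rfl]
    rw [foldl_count_add, ← ih2]

-- ===== VERDICT (by name: the statement is the Claim_ definition above) =====
theorem solution_spec : Claim_equal_solution := by
  intro n m section_ _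
  unfold Spec_solution solution solution_alt
  rw [dcGo_eq_foldl]
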